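-- pv_equiv track=rewrite | github.com/algorithm-studyy/algorithm | jiwon/boj/python/9017.py | find_fail_team
-- ===== SOURCE A (Python) =====
-- def find_fail_team(records):
--     team_count = dict()
--     result = set()
--     for record in records:
--         team_count[record] = team_count.get(record, 0) + 1
--     for key, value in team_count.items():
--         if value < 6:
--             result.add(key)
--
--     return result
-- ===== SOURCE B (Python) =====
-- def find_fail_team(records):
--     # One streaming pass: maintain counts and the answer set together.
--     counts = {}
--     result = set()
--     for r in records:
--         c = counts.get(r, 0) + 1
--         counts[r] = c
--         if c == 1:
--             result.add(r)
--         elif c == 6: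
--             result.discard(r)
--     return result
-- ===== Notes on version B (the rewrite author's own statement) =====
-- stated objective: alternative
-- what changed: Replaces A's two-pass count-then-filter (build a full count dict, then scan its items) with a single streaming pass that maintains the answer set incrementally, adding a team when its count first becomes 1 and removing it when it reaches 6.
import Mathlib
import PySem

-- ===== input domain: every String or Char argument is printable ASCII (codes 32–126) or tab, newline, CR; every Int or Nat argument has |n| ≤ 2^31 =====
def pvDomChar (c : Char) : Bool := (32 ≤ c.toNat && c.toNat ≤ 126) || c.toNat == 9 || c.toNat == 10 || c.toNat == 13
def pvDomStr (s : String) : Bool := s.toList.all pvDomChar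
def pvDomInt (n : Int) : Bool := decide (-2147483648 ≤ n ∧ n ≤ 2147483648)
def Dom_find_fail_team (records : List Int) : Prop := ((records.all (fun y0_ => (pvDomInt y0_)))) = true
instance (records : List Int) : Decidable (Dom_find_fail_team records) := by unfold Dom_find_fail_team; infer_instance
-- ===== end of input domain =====

-- B replaces A's two-pass count-then-filter with one streaming pass that maintains
-- the answer set incrementally (add at count 1, discard at count 6); same cost, different structure.


-- ===== PORT A =====
def find_fail_team (records : List Int) : List Int :=
  let team_count := records.foldl (fun d r => d.insert r (d.getD r 0 + 1))
    (PySem.Dict.empty : PySem.Dict Int Int)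
  team_count.items.foldl
    (fun (result : PySem.Set Int) kv => if kv.2 < 6 then result.add kv.1 else result)
    PySem.Set.empty

-- ===== PORT B =====
def find_fail_team_alt (records : List Int) : List Int :=
  (records.foldl
    (fun (st : PySem.Dict Int Int × PySem.Set Int) r =>
      let c := st.1.getD r 0 + 1
      let counts := st.1.insert r c
      let result :=
        if c == 1 then st.2.add r
        else if c == 6 then st.2.discard r
        else st.2
      (counts, result))
    (PySem.Dict.empty, PySem.Set.empty)).2

-- ===== PRECONDITION & SPEC =====
def Spec_find_fail_team (records : List Int) (out : List Int) : Prop := out = find_fail_team_alt records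
instance (records : List Int) (out : List Int) : Decidable (Spec_find_fail_team records out) := by unfold Spec_find_fail_team; infer_instance

-- ===== CLAIM (what is proved, stated in full; the proofs are below) =====
def Claim_equal_find_fail_team : Prop := ∀ (records : List Int), Dom_find_fail_team records → Spec_find_fail_team records (find_fail_team records)

-- ===== LEMMAS AND PROOFS =====

-- The common characterisation: first occurrences of records, keeping those with count < 6.
def pvAnswer (records : List Int) : List Int :=
  (PySem.Set.ofList records).filter (fun k => decide (((records.count k : Nat) : Int) < 6))

-- A's second loop over a nodup key list, with accumulator disjoint from the keys,
-- appends exactly the keys passing the test.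
theorem pvA_loop (p : Int → Bool) (l : List Int) (s : PySem.Set Int)
    (hnd : l.Nodup) (hdisj : ∀ x ∈ l, x ∉ s) :
    l.foldl (fun (result : PySem.Set Int) k => if p k then result.add k else result) s
      = s ++ l.filter p := by
  induction l generalizing s with
  | nil => simp
  | cons a t ih =>
    simp only [List.foldl_cons, List.filter_cons]
    rcases List.nodup_cons.mp hnd with ⟨ha, hndt⟩
    by_cases hp : p a = true
    · rw [hp]
      simp only [if_true]
      rw [PySem.Set.add_of_not_mem (hdisj a (by simp))]
      rw [ih (s ++ [a]) hndt ?_]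
      · simp
      · intro y hy hmem
        rcases List.mem_append.mp hmem with h | h
        · exact hdisj y (List.mem_cons_of_mem a hy) h
        · have heq : y = a := by simpa using h
          exact ha (heq ▸ hy)
    · simp only [hp, if_false, Bool.false_eq_true]
      exact ih s hndt (fun y hy => hdisj y (List.mem_cons_of_mem a hy))

theorem pvA_eq (records : List Int) : find_fail_team records = pvAnswer records := by
  unfold pvAnswer
  show (List.foldl (fun d r => d.insert r (d.getD r 0 + 1))
      (PySem.Dict.empty : PySem.Dict Int Int) records).items.foldl
      (fun (result : PySem.Set Int) kv => if kv.2 < 6 then result.add kv.1 else result)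
      PySem.Set.empty = _
  rw [PySem.Dict.foldl_insert_getD_add_one_eq_counter, PySem.Dict.items_counter,
    List.foldl_map]
  have h := pvA_loop (fun k => decide (((records.count k : Nat) : Int) < 6))
      (PySem.Set.ofList records) PySem.Set.empty
      (PySem.Set.nodup_ofList records) (by intro x _ h; simp [PySem.Set.empty] at h)
  simpa using h

-- B's loop invariant: after processing xs the state is (counter xs, answer of xs).
theorem pvB_inv (xs : List Int) :
    xs.foldl
      (fun (st : PySem.Dict Int Int × PySem.Set Int) r =>
        let c := st.1.getD r 0 + 1
        let counts := st.1.insert r c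
        let result :=
          if c == 1 then st.2.add r
          else if c == 6 then st.2.discard r
          else st.2
        (counts, result))
      (PySem.Dict.empty, PySem.Set.empty)
      = (PySem.Dict.counter xs, pvAnswer xs) := by
  induction xs using List.reverseRecOn with
  | nil => rfl
  | append_singleton t x ih =>
    rw [List.foldl_append, ih, List.foldl_cons, List.foldl_nil]
    simp only [PySem.Dict.getD_counter]
    have hcnt : ∀ k : Int, (t ++ [x]).count k = t.count k + (if k = x then 1 else 0) := by
      intro k
      rw [List.count_append]
      by_cases h : k = x
      · subst h; simp
      · have h' : ¬ x = k := fun hh => h hh.symm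
        simp [h, h']
    rw [Prod.mk.injEq]
    refine ⟨?_, ?_⟩
    · -- counts component
      rw [PySem.Dict.counter_append_singleton]
      simp only [PySem.Dict.modify, PySem.Dict.getD_counter]
    · -- result component
      unfold pvAnswer
      rw [PySem.Set.ofList_append_singleton]
      by_cases hc1 : ((t.count x : Int) + 1 == 1) = true
      · -- x fresh: count was 0
        have h0 : t.count x = 0 := by
          have := (beq_iff_eq).mp hc1; omega
        have hxnot : x ∉ t := by
          rw [← List.count_eq_zero]; exact h0
        rw [if_pos hc1]
        rw [PySem.Set.add_of_not_mem (by
          intro h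
          exact hxnot ((PySem.Set.mem_ofList t x).mp (List.mem_of_mem_filter h)))]
        rw [PySem.Set.add_of_not_mem (fun h => hxnot ((PySem.Set.mem_ofList t x).mp h))]
        rw [List.filter_append]
        congr 1
        · apply List.filter_congr
          intro k hk
          have hkx : k ≠ x := fun h => hxnot (by
            rw [← h]; exact (PySem.Set.mem_ofList t k).mp hk)
          simp [hcnt k, hkx]
        · simp [h0]
      · rw [if_neg hc1]
        have hpos : 1 ≤ t.count x := by
          have : ((t.count x : Int) + 1) ≠ 1 := fun h => hc1 (beq_iff_eq.mpr h)
          omega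
        have hxmem : x ∈ t := List.count_pos_iff.mp hpos
        rw [PySem.Set.add_of_mem ((PySem.Set.mem_ofList t x).mpr hxmem)]
        by_cases hc6 : ((t.count x : Int) + 1 == 6) = true
        · -- count reaches 6: discard
          have h5 : t.count x = 5 := by
            have := (beq_iff_eq).mp hc6; omega
          rw [if_pos hc6]
          show List.filter _ (List.filter _ (PySem.Set.ofList t)) = _
          rw [List.filter_filter]
          apply List.filter_congr
          intro k hk
          by_cases hkx : k = x
          · subst hkx; simp [hcnt k, h5]
          · simp [hcnt k, hkx]
        · -- count neither 1 nor 6: unchanged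
          have h5 : t.count x ≠ 5 := by
            intro h
            exact hc6 (beq_iff_eq.mpr (by omega))
          rw [if_neg hc6]
          apply List.filter_congr
          intro k hk
          by_cases hkx : k = x
          · subst hkx
            rw [decide_eq_decide, hcnt k, if_pos rfl]
            have := h5
            push_cast
            omega
          · simp [hcnt k, hkx]

theorem pvB_eq (records : List Int) : find_fail_team_alt records = pvAnswer records := by
  unfold find_fail_team_alt
  rw [pvB_inv]

-- ===== VERDICT (by name: the statement is the Claim_ definition above) =====
theorem find_fail_team_spec : Claim_equal_find_fail_team := by
  intro records _
  unfold Spec_find_fail_team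
  rw [pvA_eq, pvB_eq]
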